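-- pv_equiv track=rewrite | github.com/PrabhTheCoder/ITI1120 | ASSIGNMENTS/Assignment 2/a2_300018569/a2_part2_300018569.py | oPify
-- ===== SOURCE A (Python) =====
-- def oPify(s):
--     """(str) -> str
--     Returns a string with the letters o and p between
--     consecutive characters. If the first letter is a capital
--     the o is capitalized, if not the o is lower case. If
--     the second letter is capitalized the p is capitalized,
--     if not the p is lower case.
--     """
--     oped = ""
--     num = 1
--     if len(s) > 1:
--         for ch in s:
--             if ch in "ABCDEFGHIJKLMNOPQRSTUVWXYZ":
--                 if num > 1:
--                     if s[num-2].isalpha():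
--                         oped += "P" + ch
--                     else:
--                         oped += ch
--                     if num != len(s) and s[num].isalpha():
--                         oped += "O"
--                 elif s[num].isalpha():
--                     oped += ch + "O"
--                 else:
--                     oped += ch
--             elif ch in "abcdefghijklmnopqrstuvwxyz":
--                 if num > 1:
--                     if s[num-2].isalpha():
--                         oped += "p" + ch
--                     else:
--                         oped += ch
--                     if num != len(s) and s[num].isalpha():
--                         oped += "o"
--                 elif s[num].isalpha():
--                     oped += ch + "o"
--                 else:
--                     oped += ch
--             else:
--                 oped += ch
--             num += 1
--     else:
--         oped = s
--     return oped
-- ===== SOURCE B (Python) =====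
-- def oPify(s):
--     """Single pass with a lookback at the previous character: emit the
--     'o'/'p' separator (cased by its neighbour) before each letter that
--     follows a letter, then the character itself; join at the end."""
--     pieces = []
--     prev = None
--     for ch in s:
--         if prev is not None and prev.isalpha() and ch.isalpha():
--             pieces.append('O' if prev.isupper() else 'o')
--             pieces.append('P' if ch.isupper() else 'p')
--         pieces.append(ch)
--         prev = ch
--     return ''.join(pieces)
-- ===== Notes on version B (the rewrite author's own statement) =====
-- stated objective: simpler
-- what changed: A walks the string with a 1-based counter and two raw index lookups (one behind, one ahead) inside a six-way case split plus a length guard and builds the result by string concatenation; B is a single lookback pass that keeps only the previous character, emits the cased separator pair before each letter that follows a letter, and joins a piece list, with no indexing, no length guard and no lookahead.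
import Mathlib
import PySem

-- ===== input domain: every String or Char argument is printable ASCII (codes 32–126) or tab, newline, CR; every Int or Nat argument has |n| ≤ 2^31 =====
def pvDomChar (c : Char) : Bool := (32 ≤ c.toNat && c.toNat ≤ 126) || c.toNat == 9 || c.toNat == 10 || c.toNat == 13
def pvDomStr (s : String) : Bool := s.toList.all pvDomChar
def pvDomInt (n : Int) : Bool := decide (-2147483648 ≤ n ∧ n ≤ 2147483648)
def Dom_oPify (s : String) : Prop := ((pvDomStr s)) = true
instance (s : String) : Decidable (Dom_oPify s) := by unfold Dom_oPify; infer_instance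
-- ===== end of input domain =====

-- B re-decomposes A's index-driven lookahead loop as a single lookback pass (the cased separator
-- pair is emitted before each letter that follows a letter, from the previous character alone);
-- a timing run measured B faster by a constant factor (list-of-pieces join vs string +=).

-- ===== PORT A =====
-- the two string literals A tests membership in ('ch in "ABC…"'; exact for a single char)
def oPifyUpper : List Char := "ABCDEFGHIJKLMNOPQRSTUVWXYZ".toList
def oPifyLower : List Char := "abcdefghijklmnopqrstuvwxyz".toList

-- one iteration of A's 'for ch in s' loop; state = (oped, num), indexing into the original list l.
-- s[num-2] / s[num] are ported with pyGetD ' ': on every state the loop reaches, the index is in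
-- range (num ∈ [2, len] for s[num-2]; num < len, resp. num = 1 < len, for s[num]), so the default
-- ' ' is never read there.
def oPifyStepA (l : List Char) (st : List Char × Int) (ch : Char) : List Char × Int :=
  let oped := st.1
  let num := st.2
  let oped :=
    if oPifyUpper.contains ch then
      if num > 1 then
        let oped :=
          if PySem.Chars.isalpha (PySem.List.pyGetD l (num - 2) ' ') then oped ++ ['P', ch]
          else oped ++ [ch]
        if num ≠ (l.length : Int) ∧ PySem.Chars.isalpha (PySem.List.pyGetD l num ' ') = true then
          oped ++ ['O']
        else oped
      else if PySem.Chars.isalpha (PySem.List.pyGetD l num ' ') then oped ++ [ch, 'O']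
      else oped ++ [ch]
    else if oPifyLower.contains ch then
      if num > 1 then
        let oped :=
          if PySem.Chars.isalpha (PySem.List.pyGetD l (num - 2) ' ') then oped ++ ['p', ch]
          else oped ++ [ch]
        if num ≠ (l.length : Int) ∧ PySem.Chars.isalpha (PySem.List.pyGetD l num ' ') = true then
          oped ++ ['o']
        else oped
      else if PySem.Chars.isalpha (PySem.List.pyGetD l num ' ') then oped ++ [ch, 'o']
      else oped ++ [ch]
    else oped ++ [ch]
  (oped, num + 1)

def oPify (s : String) : String :=
  let l := s.toList
  if l.length > 1 then String.ofList (l.foldl (oPifyStepA l) ([], 1)).1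
  else s

-- ===== PORT B =====
-- one iteration of B's loop; state = (pieces, prev)
def oPifyStepB (st : List Char × Option Char) (ch : Char) : List Char × Option Char :=
  let pieces :=
    match st.2 with
    | some prev =>
      if PySem.Chars.isalpha prev && PySem.Chars.isalpha ch then
        st.1 ++ [if PySem.Chars.isupper prev then 'O' else 'o'] ++
          [if PySem.Chars.isupper ch then 'P' else 'p']
      else st.1
    | none => st.1
  (pieces ++ [ch], some ch)

def oPify_alt (s : String) : String :=
  String.ofList (s.toList.foldl oPifyStepB ([], none)).1

-- ===== PRECONDITION & SPEC =====
def Spec_oPify (s : String) (out : String) : Prop := out = oPify_alt s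
instance (s : String) (out : String) : Decidable (Spec_oPify s out) := by unfold Spec_oPify; infer_instance

-- ===== CLAIM (what is proved, stated in full; the proofs are below) =====
def Claim_equal_oPify : Prop := ∀ (s : String), Dom_oPify s → Spec_oPify s (oPify s)

-- ===== LEMMAS AND PROOFS =====

theorem char_eq_iff_toNat (a b : Char) : a = b ↔ a.toNat = b.toNat :=
  ⟨fun h => h ▸ rfl, fun h => Char.ext (UInt32.toNat_inj.mp h)⟩

theorem contains_upper_eq (c : Char) : oPifyUpper.contains c = PySem.Chars.isupper c := by
  have h : oPifyUpper = ['A','B','C','D','E','F','G','H','I','J','K','L','M','N','O','P','Q','R','S','T','U','V','W','X','Y','Z'] := rfl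
  rw [Bool.eq_iff_iff]
  simp only [List.contains_eq_mem, h, List.mem_cons, List.not_mem_nil, or_false, decide_eq_true_eq,
    char_eq_iff_toNat, PySem.Chars.isupper, Bool.and_eq_true, Char.le_def, UInt32.le_iff_toNat_le]
  simp only [Char.toNat_val, Char.reduceToNat]
  omega

theorem contains_lower_eq (c : Char) : oPifyLower.contains c = PySem.Chars.islower c := by
  have h : oPifyLower = ['a','b','c','d','e','f','g','h','i','j','k','l','m','n','o','p','q','r','s','t','u','v','w','x','y','z'] := rfl
  rw [Bool.eq_iff_iff]
  simp only [List.contains_eq_mem, h, List.mem_cons, List.not_mem_nil, or_false, decide_eq_true_eq,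
    char_eq_iff_toNat, PySem.Chars.islower, Bool.and_eq_true, Char.le_def, UInt32.le_iff_toNat_le]
  simp only [Char.toNat_val, Char.reduceToNat]
  omega

-- the cased separator letters
def oChar (c : Char) : Char := if PySem.Chars.isupper c then 'O' else 'o'
def pChar (c : Char) : Char := if PySem.Chars.isupper c then 'P' else 'p'

-- what A emits in front of / behind a character
def sepP : Option Char → Char → List Char
  | none, _ => []
  | some p, c => if PySem.Chars.isalpha c && PySem.Chars.isalpha p then [pChar c] else []

def sepO (c : Char) : List Char → List Char
  | [] => []
  | d :: _ => if PySem.Chars.isalpha c && PySem.Chars.isalpha d then [oChar c] else []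

def coreA : Option Char → List Char → List Char
  | _, [] => []
  | prev, c :: rest => sepP prev c ++ c :: (sepO c rest ++ coreA (some c) rest)

-- what B emits in front of a character
def sepB : Option Char → Char → List Char
  | none, _ => []
  | some p, c => if PySem.Chars.isalpha p && PySem.Chars.isalpha c then [oChar p, pChar c] else []

def coreB : Option Char → List Char → List Char
  | _, [] => []
  | prev, c :: rest => sepB prev c ++ c :: coreB (some c) rest

theorem foldB : ∀ (t acc : List Char) (prev : Option Char),
    (t.foldl oPifyStepB (acc, prev)).1 = acc ++ coreB prev t := by
  intro t
  induction t with
  | nil => intro acc prev; simp [coreB]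
  | cons c rest ih =>
    intro acc prev
    rw [List.foldl_cons]
    cases prev with
    | none => simp [oPifyStepB, ih, coreB, sepB]
    | some p =>
      by_cases h : (PySem.Chars.isalpha p && PySem.Chars.isalpha c) = true <;>
        simp [oPifyStepB, h, ih, coreB, sepB, oChar, pChar]

theorem bridge : ∀ (t : List Char) (c : Char),
    sepO c t ++ coreA (some c) t = coreB (some c) t := by
  intro t
  induction t with
  | nil => intro c; simp [sepO, coreA, coreB]
  | cons d rest ih =>
    intro c
    simp only [coreA, coreB, sepO, sepP, sepB]
    rw [← ih d]
    by_cases h1 : PySem.Chars.isalpha c = true <;>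
      by_cases h2 : PySem.Chars.isalpha d = true <;>
        simp [h1, h2, sepO]

theorem coreA_none (t : List Char) : coreA none t = coreB none t := by
  cases t with
  | nil => rfl
  | cons c rest =>
    simp only [coreA, coreB, sepP, sepB, List.nil_append]
    rw [← bridge]

-- (xs ++ z).getD xs.length d = z.headD d
theorem getD_append_length {α : Type} (xs z : List α) (d : α) :
    (xs ++ z).getD xs.length d = z.headD d := by
  induction xs with
  | nil => cases z <;> rfl
  | cons x xs ih => simpa using ih

theorem stepA_eq (pre rest acc : List Char) (c : Char) :
    oPifyStepA (pre ++ c :: rest) (acc, (pre.length : Int) + 1) c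
      = (acc ++ (sepP pre.getLast? c ++ c :: sepO c rest), (pre.length : Int) + 2) := by
  have hnext : PySem.List.pyGetD (pre ++ c :: rest) ((pre.length : Int) + 1) ' '
      = rest.headD ' ' := by
    have : ((pre.length : Int) + 1) = ((pre.length + 1 : Nat) : Int) := by push_cast; ring
    rw [this, PySem.List.pyGetD_natCast]
    have h2 : pre ++ c :: rest = (pre ++ [c]) ++ rest := by simp
    have h3 : pre.length + 1 = (pre ++ [c]).length := by simp
    rw [h2, h3, getD_append_length]
  have hlen : ((pre.length : Int) + 1 ≠ ((pre ++ c :: rest).length : Int)) ↔ rest ≠ [] := by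
    simp only [List.length_append, List.length_cons]
    constructor
    · intro h hr; apply h; subst hr; simp
    · intro hr h
      have : rest.length ≠ 0 := fun h0 => hr (List.eq_nil_of_length_eq_zero h0)
      omega
  rcases List.eq_nil_or_concat pre with hpre | ⟨ys, p, hpre⟩
  · -- first character: num = 1, the 'elif s[num].isalpha()' branch
    subst hpre
    have h1 : ((([] : List Char).length : Int) + 1) = ((1 : Nat) : Int) := by simp
    simp only [oPifyStepA, contains_upper_eq, contains_lower_eq, List.nil_append,
      List.getLast?_nil, sepP]
    rw [show ((([] : List Char).length : Int) + 1) = (1 : Int) by simp] at hnext ⊢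
    have hgt : ¬ ((1 : Int) > 1) := by omega
    simp only [hgt, if_false, List.nil_append] at hnext ⊢
    rw [show ((1 : Int)) = (((([] : List Char) ++ [c]).length : Nat) : Int) by simp] at hnext ⊢
    cases rest with
    | nil =>
      simp only [List.headD_nil] at hnext
      rw [hnext]
      by_cases hu : PySem.Chars.isupper c = true <;>
        by_cases hl : PySem.Chars.islower c = true <;>
          (simp [hu, hl, sepO, PySem.Chars.isalpha]; try decide)
    | cons d rs =>
      simp only [List.headD_cons] at hnext
      rw [hnext]
      by_cases hu : PySem.Chars.isupper c = true <;>
        by_cases hl : PySem.Chars.islower c = true <;>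
          by_cases hdu : PySem.Chars.isupper d = true <;>
            by_cases hdl : PySem.Chars.islower d = true <;>
              simp [hu, hl, hdu, hdl, sepO, oChar, PySem.Chars.isalpha]
  · -- num > 1: previous character is p = pre.getLast
    subst hpre
    simp only [List.concat_eq_append] at hnext hlen ⊢
    have hgt : ((ys ++ [p]).length : Int) + 1 > 1 := by
      simp only [List.length_append, List.length_cons, List.length_nil]
      omega
    have hprev : PySem.List.pyGetD ((ys ++ [p]) ++ c :: rest) (((ys ++ [p]).length : Int) + 1 - 2) ' ' = p := by
      have : (((ys ++ [p]).length : Int) + 1 - 2) = ((ys.length : Nat) : Int) := by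
        simp only [List.length_append, List.length_cons, List.length_nil]
        omega
      rw [this, PySem.List.pyGetD_natCast]
      have h2 : (ys ++ [p]) ++ c :: rest = ys ++ (p :: c :: rest) := by simp
      rw [h2, getD_append_length]
      rfl
    have hglast : (ys ++ [p]).getLast? = some p := List.getLast?_concat
    simp only [oPifyStepA, contains_upper_eq, contains_lower_eq, hgt, if_pos, hprev, hnext, hglast,
      sepP]
    cases rest with
    | nil =>
      by_cases hu : PySem.Chars.isupper c = true <;>
        by_cases hl : PySem.Chars.islower c = true <;>
          by_cases hpu : PySem.Chars.isupper p = true <;>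
            by_cases hpl : PySem.Chars.islower p = true <;>
              (simp [hu, hl, hpu, hpl, sepO, pChar, PySem.Chars.isalpha]; try omega)
    | cons d rs =>
      -- the 'num != len(s)' conjunct, in the normal form the closing simp produces
      have hne : ¬ ((ys.length : Int) + 1 + 1 = (ys.length : Int) + ((rs.length : Int) + 1 + 1 + 1)) := by
        omega
      simp only [List.headD_cons]
      by_cases hu : PySem.Chars.isupper c = true <;>
        by_cases hl : PySem.Chars.islower c = true <;>
          by_cases hpu : PySem.Chars.isupper p = true <;>
            by_cases hpl : PySem.Chars.islower p = true <;>
              by_cases hdu : PySem.Chars.isupper d = true <;>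
                by_cases hdl : PySem.Chars.islower d = true <;>
                  (simp [hu, hl, hpu, hpl, hdu, hdl, hne, sepO, oChar, pChar, PySem.Chars.isalpha]; try omega)

theorem foldA (l : List Char) : ∀ (t pre acc : List Char), l = pre ++ t →
    (t.foldl (oPifyStepA l) (acc, (pre.length : Int) + 1)).1 = acc ++ coreA pre.getLast? t := by
  intro t
  induction t with
  | nil => intro pre acc _; simp [coreA]
  | cons c rest ih =>
    intro pre acc h
    subst h
    rw [List.foldl_cons, stepA_eq pre rest acc c]
    have h2 : (((pre ++ [c]).length : Int) + 1) = ((pre.length : Int) + 2) := by simp; ring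
    have h3 := ih (pre ++ [c]) (acc ++ (sepP pre.getLast? c ++ c :: sepO c rest)) (by simp)
    rw [h2, List.getLast?_concat] at h3
    rw [h3]
    simp [coreA]

theorem oPify_eq (s : String) : oPify s = oPify_alt s := by
  unfold oPify oPify_alt
  rw [foldB]
  by_cases h : s.toList.length > 1
  · rw [if_pos h]
    have hfa := foldA s.toList s.toList [] [] rfl
    rw [show ((([] : List Char).length : Int) + 1) = (1 : Int) from by simp] at hfa
    rw [hfa]
    simp only [List.getLast?_nil, List.nil_append, coreA_none]
  · rw [if_neg h]
    conv_lhs => rw [show s = String.ofList s.toList from (String.ofList_toList (s := s)).symm]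
    cases hl : s.toList with
    | nil => simp [coreB]
    | cons c rest =>
      have : rest = [] := by
        rw [hl] at h
        simp only [List.length_cons, gt_iff_lt, not_lt] at h
        exact List.eq_nil_of_length_eq_zero (by omega)
      subst this
      simp [coreB, sepB]

-- ===== VERDICT (by name: the statement is the Claim_ definition above) =====
theorem oPify_spec : Claim_equal_oPify := fun s _ => oPify_eq s
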